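-- pv_equiv track=rewrite | github.com/Ashwin007008/Swap-the-largest-and-smallest-element-from-the-array | swap_array.py | swap_largest_smallest
-- ===== SOURCE A (Python) =====
-- def swap_largest_smallest(arr):
--     """
--     Swap the largest and smallest elements in the array.
--
--     Args:
--         arr: List of integers
--
--     Returns:
--         Modified list with largest and smallest elements swapped
--     """
--     if len(arr) <= 1:
--         return arr
--
--     # Find indices of largest and smallest elements
--     min_idx = 0
--     max_idx = 0
--
--     for i in range(len(arr)):
--         if arr[i] < arr[min_idx]:
--             min_idx = i
--         if arr[i] > arr[max_idx]:
--             max_idx = i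
--
--     # Swap the elements
--     arr[min_idx], arr[max_idx] = arr[max_idx], arr[min_idx]
--
--     return arr
-- ===== SOURCE B (Python) =====
-- def swap_largest_smallest(arr):
--     """Swap the largest and smallest elements in the array (in place, like A)."""
--     if len(arr) <= 1:
--         return arr
--     mn, mx = min(arr), max(arr)
--     out = []
--     done_min = False
--     done_max = False
--     for x in arr:
--         if not done_min and x == mn:
--             out.append(mx)
--             done_min = True
--         elif not done_max and x == mx:
--             out.append(mn)
--             done_max = True
--         else:
--             out.append(x)
--     arr[:] = out
--     return arr
-- ===== Notes on version B (the rewrite author's own statement) =====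
-- stated objective: simpler
-- what changed: A tracks min/max indices in one fused index loop and then swaps in place by index; B computes the min and max values with min()/max() and rebuilds the list in a single flagged pass that replaces the first occurrence of the min by the max and the first occurrence of the max by the min, with no index bookkeeping.
import Mathlib
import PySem

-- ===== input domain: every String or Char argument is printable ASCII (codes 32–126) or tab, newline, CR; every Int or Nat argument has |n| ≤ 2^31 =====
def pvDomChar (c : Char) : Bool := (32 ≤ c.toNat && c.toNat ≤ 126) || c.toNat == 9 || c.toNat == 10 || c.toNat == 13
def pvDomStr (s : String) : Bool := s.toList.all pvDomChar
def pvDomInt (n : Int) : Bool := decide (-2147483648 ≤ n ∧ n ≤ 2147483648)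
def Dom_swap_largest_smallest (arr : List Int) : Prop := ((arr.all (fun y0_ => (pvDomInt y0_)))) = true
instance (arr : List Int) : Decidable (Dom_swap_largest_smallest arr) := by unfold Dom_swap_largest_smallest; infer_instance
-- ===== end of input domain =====

-- B replaces A's index-tracking scan-and-swap with a single flagged rebuild pass:
-- compute min/max values, then one pass replaces the first min by max and the first max by min (objective: simpler).


-- ===== PORT A =====
def swap_largest_smallest (arr : List Int) : List Int :=
  if arr.length ≤ 1 then arr
  else
    let p := (PySem.List.pyRange 0 arr.length 1).foldl
      (fun (p : Int × Int) i =>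
        let mi := if PySem.List.pyGetD arr i 0 < PySem.List.pyGetD arr p.1 0 then i else p.1
        let ma := if PySem.List.pyGetD arr i 0 > PySem.List.pyGetD arr p.2 0 then i else p.2
        (mi, ma)) (0, 0)
    -- arr[min_idx], arr[max_idx] = arr[max_idx], arr[min_idx]
    let a := PySem.List.pyGetD arr p.2 0
    let b := PySem.List.pyGetD arr p.1 0
    PySem.List.pySetD (PySem.List.pySetD arr p.1 a) p.2 b

-- ===== PORT B =====
def swap_largest_smallest_alt (arr : List Int) : List Int :=
  if arr.length ≤ 1 then arr
  else
    match arr with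
    | [] => arr
    | x :: xs =>
      let mn := xs.foldl min x        -- min(arr)
      let mx := xs.foldl max x        -- max(arr)
      let r := (x :: xs).foldl (fun (s : List Int × Bool × Bool) y =>
          if !s.2.1 && y == mn then (s.1 ++ [mx], true, s.2.2)
          else if !s.2.2 && y == mx then (s.1 ++ [mn], s.2.1, true)
          else (s.1 ++ [y], s.2.1, s.2.2)) ([], false, false)
      r.1

-- ===== PRECONDITION & SPEC =====
def Spec_swap_largest_smallest (arr : List Int) (out : List Int) : Prop := out = swap_largest_smallest_alt arr
instance (arr : List Int) (out : List Int) : Decidable (Spec_swap_largest_smallest arr out) := by unfold Spec_swap_largest_smallest; infer_instance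

-- ===== CLAIM (what is proved, stated in full; the proofs are below) =====
def Claim_equal_swap_largest_smallest : Prop := ∀ (arr : List Int), Dom_swap_largest_smallest arr → Spec_swap_largest_smallest arr (swap_largest_smallest arr)

-- ===== LEMMAS AND PROOFS =====

-- value of the minimum / maximum of a nonempty list, as the ports compute them
def minV : List Int → Int | [] => 0 | x :: xs => xs.foldl min x
def maxV : List Int → Int | [] => 0 | x :: xs => xs.foldl max x

-- B's flagged pass, as a structural recursion (proof helper; B's port is the foldl above)
def altGo (mn mx : Int) : Bool → Bool → List Int → List Int
  | _, _, [] => []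
  | dm, dx, y :: ys =>
    if !dm && y == mn then mx :: altGo mn mx true dx ys
    else if !dx && y == mx then mn :: altGo mn mx dm true ys
    else y :: altGo mn mx dm dx ys

theorem altGo_cons (mn mx : Int) (dm dx : Bool) (y : Int) (ys : List Int) :
    altGo mn mx dm dx (y :: ys)
      = if !dm && y == mn then mx :: altGo mn mx true dx ys
        else if !dx && y == mx then mn :: altGo mn mx dm true ys
        else y :: altGo mn mx dm dx ys := rfl

theorem foldB_eq_altGo (mn mx : Int) (l : List Int) (acc : List Int) (dm dx : Bool) :
    (l.foldl (fun (s : List Int × Bool × Bool) y =>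
        if !s.2.1 && y == mn then (s.1 ++ [mx], true, s.2.2)
        else if !s.2.2 && y == mx then (s.1 ++ [mn], s.2.1, true)
        else (s.1 ++ [y], s.2.1, s.2.2)) (acc, dm, dx)).1 = acc ++ altGo mn mx dm dx l := by
  induction l generalizing acc dm dx with
  | nil => simp [altGo]
  | cons y ys ih =>
    simp only [List.foldl_cons]
    split_ifs with h1 h2
    · rw [ih, altGo_cons, if_pos h1]; simp
    · rw [ih, altGo_cons, if_neg h1, if_pos h2]; simp
    · rw [ih, altGo_cons, if_neg h1, if_neg h2]; simp

theorem altGo_tt (mn mx : Int) (l : List Int) : altGo mn mx true true l = l := by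
  induction l with
  | nil => rfl
  | cons y ys ih => simp [altGo, ih]

theorem altGo_tf (mn mx : Int) (l : List Int) :
    altGo mn mx true false l = l.set (l.findIdx (· == mx)) mn := by
  induction l with
  | nil => rfl
  | cons y ys ih =>
    by_cases h : y == mx
    · simp [altGo, h, List.findIdx_cons, altGo_tt]
    · simp [altGo, h, List.findIdx_cons, ih]

theorem altGo_ft (mn mx : Int) (l : List Int) :
    altGo mn mx false true l = l.set (l.findIdx (· == mn)) mx := by
  induction l with
  | nil => rfl
  | cons y ys ih =>
    by_cases h : y == mn
    · simp [altGo, h, List.findIdx_cons, altGo_tt]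
    · simp [altGo, h, List.findIdx_cons, ih]

theorem set_findIdx_self (l : List Int) (a : Int) :
    l.set (l.findIdx (· == a)) a = l := by
  induction l with
  | nil => rfl
  | cons y ys ih =>
    by_cases h : y == a
    · simp [List.findIdx_cons, h, (eq_of_beq h).symm]
    · simp [List.findIdx_cons, h, ih]

theorem altGo_main (mn mx : Int) (l : List Int) :
    altGo mn mx false false l
      = (l.set (l.findIdx (· == mn)) mx).set (l.findIdx (· == mx)) mn := by
  induction l with
  | nil => rfl
  | cons y ys ih =>
    by_cases h1 : y == mn
    · by_cases h2 : y == mx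
      · have hmn : y = mn := eq_of_beq h1
        have hmx : y = mx := eq_of_beq h2
        simp [altGo, h1, List.findIdx_cons, h2, altGo_tf, ← hmn, ← hmx, set_findIdx_self]
      · simp [altGo, h1, List.findIdx_cons, h2, altGo_tf]
    · by_cases h2 : y == mx
      · simp [altGo, h1, List.findIdx_cons, h2, altGo_ft]
      · simp [altGo, h1, List.findIdx_cons, h2, ih]

-- basic facts about minV / maxV
theorem minV_spec (l : List Int) (h : l ≠ []) :
    minV l ∈ l ∧ ∀ b ∈ l, minV l ≤ b := by
  match l with
  | x :: xs =>
    have hm : (x :: xs).min? = some (minV (x :: xs)) := by simp [List.min?, minV]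
    exact List.min?_eq_some_iff.mp hm

theorem maxV_spec (l : List Int) (h : l ≠ []) :
    maxV l ∈ l ∧ ∀ b ∈ l, b ≤ maxV l := by
  match l with
  | x :: xs =>
    have hm : (x :: xs).max? = some (maxV (x :: xs)) := by simp [List.max?, maxV]
    exact List.max?_eq_some_iff.mp hm

theorem minV_mem (l : List Int) (h : l ≠ []) : minV l ∈ l := (minV_spec l h).1
theorem maxV_mem (l : List Int) (h : l ≠ []) : maxV l ∈ l := (maxV_spec l h).1
theorem minV_le (l : List Int) (a : Int) (h : l ≠ []) (ha : a ∈ l) : minV l ≤ a := (minV_spec l h).2 a ha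
theorem le_maxV (l : List Int) (a : Int) (h : l ≠ []) (ha : a ∈ l) : a ≤ maxV l := (maxV_spec l h).2 a ha

theorem minV_append (l : List Int) (h : l ≠ []) (y : Int) :
    minV (l ++ [y]) = min (minV l) y := by
  match l with
  | x :: xs => simp [minV, List.foldl_append]

theorem maxV_append (l : List Int) (h : l ≠ []) (y : Int) :
    maxV (l ++ [y]) = max (maxV l) y := by
  match l with
  | x :: xs => simp [maxV, List.foldl_append]

theorem fidx_min_append (l : List Int) (h : l ≠ []) (y : Int) :
    (l ++ [y]).findIdx (· == minV (l ++ [y]))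
      = if y < minV l then l.length else l.findIdx (· == minV l) := by
  rw [minV_append l h y]
  by_cases hy : y < minV l
  · have hmin : min (minV l) y = y := min_eq_right (le_of_lt hy)
    have hfull : l.findIdx (· == y) = l.length := by
      rw [List.findIdx_eq_length]
      intro a ha
      have := minV_le l a h ha
      simp only [beq_eq_false_iff_ne, ne_eq]
      intro hae; omega
    rw [hmin, List.findIdx_append, hfull]
    simp [hy, List.findIdx_cons]
  · have hmin : min (minV l) y = minV l := min_eq_left (by omega)
    have hlt : l.findIdx (· == minV l) < l.length :=
      List.findIdx_lt_length_of_exists ⟨minV l, minV_mem l h, by simp⟩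
    rw [hmin, List.findIdx_append]
    simp [hlt, hy]

theorem fidx_max_append (l : List Int) (h : l ≠ []) (y : Int) :
    (l ++ [y]).findIdx (· == maxV (l ++ [y]))
      = if maxV l < y then l.length else l.findIdx (· == maxV l) := by
  rw [maxV_append l h y]
  by_cases hy : maxV l < y
  · have hmax : max (maxV l) y = y := max_eq_right (le_of_lt hy)
    have hfull : l.findIdx (· == y) = l.length := by
      rw [List.findIdx_eq_length]
      intro a ha
      have := le_maxV l a h ha
      simp only [beq_eq_false_iff_ne, ne_eq]
      intro hae; omega
    rw [hmax, List.findIdx_append, hfull]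
    simp [hy, List.findIdx_cons]
  · have hmax : max (maxV l) y = maxV l := max_eq_left (by omega)
    have hlt : l.findIdx (· == maxV l) < l.length :=
      List.findIdx_lt_length_of_exists ⟨maxV l, maxV_mem l h, by simp⟩
    rw [hmax, List.findIdx_append]
    simp [hlt, hy]

theorem fidx_min_lt (l : List Int) (h : l ≠ []) :
    l.findIdx (· == minV l) < l.length :=
  List.findIdx_lt_length_of_exists ⟨minV l, minV_mem l h, by simp⟩

theorem fidx_max_lt (l : List Int) (h : l ≠ []) :
    l.findIdx (· == maxV l) < l.length :=
  List.findIdx_lt_length_of_exists ⟨maxV l, maxV_mem l h, by simp⟩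

theorem getElem_fidx_min (l : List Int) (h : l ≠ []) :
    l[l.findIdx (· == minV l)]'(fidx_min_lt l h) = minV l := by
  have := List.findIdx_getElem (p := (· == minV l)) (xs := l) (w := fidx_min_lt l h)
  exact eq_of_beq this

theorem getElem_fidx_max (l : List Int) (h : l ≠ []) :
    l[l.findIdx (· == maxV l)]'(fidx_max_lt l h) = maxV l := by
  have := List.findIdx_getElem (p := (· == maxV l)) (xs := l) (w := fidx_max_lt l h)
  exact eq_of_beq this

-- A's fold over range(len(arr)) computes the first min-index and first max-index of arr.take k
theorem foldA_take (arr : List Int) (k : Nat) (h1 : 1 ≤ k) (hk : k ≤ arr.length) :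
    (PySem.List.pyRange 0 (k : Int) 1).foldl
      (fun (p : Int × Int) i =>
        let mi := if PySem.List.pyGetD arr i 0 < PySem.List.pyGetD arr p.1 0 then i else p.1
        let ma := if PySem.List.pyGetD arr i 0 > PySem.List.pyGetD arr p.2 0 then i else p.2
        (mi, ma)) (0, 0)
      = (((arr.take k).findIdx (· == minV (arr.take k)) : Int),
         ((arr.take k).findIdx (· == maxV (arr.take k)) : Int)) := by
  induction k with
  | zero => omega
  | succ n ih =>
    by_cases hn : n = 0
    · subst hn
      have harr : arr ≠ [] := by intro h; simp [h] at hk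
      match arr with
      | x :: xs =>
        have : PySem.List.pyRange 0 ((1 : Nat) : Int) 1 = [0] := by
          simpa using PySem.List.pyRange_one_singleton (a := 0)
        rw [this]
        simp [minV, maxV, List.findIdx_cons, PySem.List.pyGetD_zero]
    · have hn1 : 1 ≤ n := by omega
      have hnlen : n ≤ arr.length := by omega
      have hsplit : PySem.List.pyRange 0 ((n + 1 : Nat) : Int) 1
          = PySem.List.pyRange 0 (n : Int) 1 ++ [(n : Int)] := by
        push_cast
        exact PySem.List.pyRange_one_succ_right (a := 0) (b := (n : Int)) (by positivity)
      rw [hsplit, List.foldl_append, ih hn1 hnlen]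
      have hlt : n < arr.length := by omega
      set l := arr.take n with hl
      have hlne : l ≠ [] := by
        intro h
        have := congrArg List.length h
        simp [hl, min_eq_left hnlen] at this
        omega
      have hllen : l.length = n := by rw [hl, List.length_take]; omega
      -- the element values read by the step
      have hget_k : PySem.List.pyGetD arr (n : Int) 0 = arr[n] := by
        rw [PySem.List.pyGetD_natCast]; simp [List.getD, hlt]
      have himin := fidx_min_lt l hlne
      have himax := fidx_max_lt l hlne
      have hget_min : PySem.List.pyGetD arr ((l.findIdx (· == minV l) : Nat) : Int) 0 = minV l := by
        rw [PySem.List.pyGetD_natCast]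
        have hlt' : l.findIdx (· == minV l) < arr.length := by omega
        simp only [List.getD, List.getElem?_eq_getElem hlt', Option.getD_some]
        have := getElem_fidx_min l hlne
        rwa [List.getElem_take] at this
      have hget_max : PySem.List.pyGetD arr ((l.findIdx (· == maxV l) : Nat) : Int) 0 = maxV l := by
        rw [PySem.List.pyGetD_natCast]
        have hlt' : l.findIdx (· == maxV l) < arr.length := by omega
        simp only [List.getD, List.getElem?_eq_getElem hlt', Option.getD_some]
        have := getElem_fidx_max l hlne
        rwa [List.getElem_take] at this
      have htake : arr.take (n + 1) = l ++ [arr[n]] := by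
        rw [hl, List.take_succ]
        simp [List.getElem?_eq_getElem hlt]
      rw [htake, fidx_min_append l hlne arr[n], fidx_max_append l hlne arr[n]]
      simp only [List.foldl_cons, List.foldl_nil, hget_k, hget_min, hget_max, gt_iff_lt,
        hllen, Prod.mk.injEq]
      refine ⟨?_, ?_⟩ <;> split_ifs <;> simp

-- ===== VERDICT (by name: the statement is the Claim_ definition above) =====
theorem swap_largest_smallest_spec : Claim_equal_swap_largest_smallest := by
  intro arr _
  unfold Spec_swap_largest_smallest swap_largest_smallest swap_largest_smallest_alt
  by_cases hlen : arr.length ≤ 1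
  · simp [hlen]
  · simp only [hlen, if_false]
    match arr with
    | x :: xs =>
      have hne : (x :: xs) ≠ [] := by simp
      have hfold := foldA_take (x :: xs) (x :: xs).length (by simp) (le_refl _)
      rw [List.take_length] at hfold
      simp only []
      rw [hfold]
      have himin := fidx_min_lt (x :: xs) hne
      have himax := fidx_max_lt (x :: xs) hne
      have hgmax : PySem.List.pyGetD (x :: xs)
          ((((x :: xs).findIdx (· == maxV (x :: xs)) : Nat) : Int)) 0 = maxV (x :: xs) := by
        rw [PySem.List.pyGetD_natCast]
        simp only [List.getD, List.getElem?_eq_getElem himax, Option.getD_some]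
        exact getElem_fidx_max _ hne
      have hgmin : PySem.List.pyGetD (x :: xs)
          ((((x :: xs).findIdx (· == minV (x :: xs)) : Nat) : Int)) 0 = minV (x :: xs) := by
        rw [PySem.List.pyGetD_natCast]
        simp only [List.getD, List.getElem?_eq_getElem himin, Option.getD_some]
        exact getElem_fidx_min _ hne
      rw [hgmax, hgmin, PySem.List.pySetD_natCast, PySem.List.pySetD_natCast,
        foldB_eq_altGo, List.nil_append, altGo_main]
      have hmn : xs.foldl min x = minV (x :: xs) := rfl
      have hmx : xs.foldl max x = maxV (x :: xs) := rfl
      rw [hmn, hmx]
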